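-- pv_equiv track=rewrite | github.com/bruceblake/Hopfield-Network | hopfield_applications.py | _create_hamming_code
-- ===== SOURCE A (Python) =====
-- from typing import List, Dict, Tuple, Optional
--
-- def _create_hamming_code(data: List[int], parity_bits: int) -> List[int]:
--     """Create Hamming code from data bits."""
--     n = len(data) + parity_bits
--     code = [0] * n
--
--     # Place data bits
--     j = 0
--     for i in range(n):
--         if (i + 1) & i == 0:  # Skip positions that are powers of 2
--             continue
--         code[i] = data[j]
--         j += 1
--
--     # Calculate parity bits
--     for i in range(parity_bits):
--         parity_pos = (1 << i) - 1
--         parity = 0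
--         for j in range(parity_pos, n, 2 * (parity_pos + 1)):
--             for k in range(min(parity_pos + 1, n - j)):
--                 if j + k != parity_pos:
--                     parity ^= code[j + k]
--         code[parity_pos] = parity
--
--     return code
-- ===== SOURCE B (Python) =====
-- def _create_hamming_code(data, parity_bits):
--     """Create Hamming code from data bits (scatter formulation)."""
--     n = len(data) + parity_bits
--     code = [0] * n
--
--     # Place data bits (same placement as the spec requires)
--     j = 0
--     for i in range(n):
--         if (i + 1) & i == 0:  # Skip positions that are powers of 2
--             continue
--         code[i] = data[j]
--         j += 1
--
--     # Scatter: one pass over all positions, XOR each data position into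
--     # the parity bucket of every set bit of its 1-based index.
--     parity = [0] * parity_bits
--     for p in range(n):
--         if (p + 1) & p == 0:  # parity slots hold no data
--             continue
--         v = p + 1
--         i = 0
--         while v:
--             if v & 1 and i < parity_bits:
--                 parity[i] ^= code[p]
--             v >>= 1
--             i += 1
--
--     for i in range(parity_bits):
--         code[(1 << i) - 1] = parity[i]
--     return code
-- ===== Notes on version B (the rewrite author's own statement) =====
-- stated objective: alternative
-- what changed: The per-parity-bit gather with strided nested index loops is replaced by a single scatter pass over all positions that XORs each data position into the parity bucket of every set bit of its 1-based index, with the parity slots written afterwards.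
import Mathlib
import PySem

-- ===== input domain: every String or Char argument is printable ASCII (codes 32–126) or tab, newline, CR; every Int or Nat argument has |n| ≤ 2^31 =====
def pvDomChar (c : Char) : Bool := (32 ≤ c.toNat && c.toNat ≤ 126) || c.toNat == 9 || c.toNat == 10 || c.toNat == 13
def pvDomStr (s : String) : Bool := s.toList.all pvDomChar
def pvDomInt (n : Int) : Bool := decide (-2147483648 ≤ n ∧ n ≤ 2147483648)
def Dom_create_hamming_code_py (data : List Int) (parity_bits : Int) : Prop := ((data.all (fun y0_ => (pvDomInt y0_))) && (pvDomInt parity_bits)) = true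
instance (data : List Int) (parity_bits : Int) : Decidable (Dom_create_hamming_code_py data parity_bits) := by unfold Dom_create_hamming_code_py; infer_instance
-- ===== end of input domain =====

-- B replaces A's per-parity-bit gather (strided nested loops) by a single scatter pass
-- over all positions, XORing each data position into the bucket of every set bit of its
-- 1-based index; same return value on every input A returns on (objective: alternative).

-- ===== PORT A =====
-- `(i+1) & i == 0` — Python's power-of-two position test, shared verbatim by A and B
def pvPow2Pos (q : Nat) : Bool := (q + 1) &&& q == 0

-- the data-bit placement loop, textually identical in A and in Source B; `data[j]` is ported
-- as `data.getD j 0`, exact inside Pre_ (outside Pre_ Python raises IndexError there)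
def pvPlace (data : List Int) (nn : Nat) : List Int :=
  ((List.range nn).foldl (fun (st : List Int × Nat) i =>
    if pvPow2Pos i then st
    else (st.1.set i (data.getD st.2 0), st.2 + 1)) (List.replicate nn 0, 0)).1

-- hand port of Python `range(a, b, s)` for s > 0 (the only use: s = 2*(parity_pos+1) > 0)
def pvStride (a b s : Nat) : List Nat :=
  (List.range ((b - a + s - 1) / s)).map (fun t => a + t * s)

def create_hamming_code_py (data : List Int) (parity_bits : Int) : List Int :=
  let nn : Nat := (data.length + parity_bits).toNat
  let code := pvPlace data nn
  (List.range parity_bits.toNat).foldl (fun code i =>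
    let pp := 2 ^ i - 1
    let parity := (pvStride pp nn (2 * (pp + 1))).foldl (fun par j =>
      (List.range (min (pp + 1) (nn - j))).foldl (fun par k =>
        if j + k ≠ pp then PySem.Int.bxor par (code.getD (j + k) 0) else par) par) 0
    code.set pp parity) code

-- ===== PORT B =====
-- the `while v:` loop of Source B: XOR x into bucket i for every set bit of v (guarded i < parity_bits)
def pvScatter (v i : Nat) (parity_bits : Int) (x : Int) (par : List Int) : List Int :=
  if h : v = 0 then par
  else pvScatter (v / 2) (i + 1) parity_bits x
    (if v % 2 = 1 ∧ (i : Int) < parity_bits then par.set i (PySem.Int.bxor (par.getD i 0) x) else par)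
termination_by v
decreasing_by exact Nat.div_lt_self (Nat.pos_of_ne_zero h) one_lt_two

def create_hamming_code_py_alt (data : List Int) (parity_bits : Int) : List Int :=
  let nn : Nat := (data.length + parity_bits).toNat
  let code := pvPlace data nn
  let par := (List.range nn).foldl (fun par p =>
    if pvPow2Pos p then par
    else pvScatter (p + 1) 0 parity_bits (code.getD p 0) par)
    (List.replicate parity_bits.toNat 0)
  (List.range parity_bits.toNat).foldl (fun code i =>
    code.set (2 ^ i - 1) (par.getD i 0)) code

-- ===== PRECONDITION & SPEC =====
-- Pre_ excludes exactly the inputs on which Python A raises IndexError (more data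
-- positions than data bits, equivalently a parity position beyond the code length).
def Pre_create_hamming_code_py (data : List Int) (parity_bits : Int) : Prop :=
  parity_bits ≤ 0 ∨ 2 ^ (parity_bits.toNat - 1) ≤ (data.length + parity_bits).toNat
instance (data : List Int) (parity_bits : Int) : Decidable (Pre_create_hamming_code_py data parity_bits) := by unfold Pre_create_hamming_code_py; infer_instance

def pvWitness_create_hamming_code_py : List Int × Int := ([1, 0, 1, 1], 3)

def Spec_create_hamming_code_py (data : List Int) (parity_bits : Int) (out : List Int) : Prop := out = create_hamming_code_py_alt data parity_bits
instance (data : List Int) (parity_bits : Int) (out : List Int) : Decidable (Spec_create_hamming_code_py data parity_bits out) := by unfold Spec_create_hamming_code_py; infer_instance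

-- ===== CLAIM (what is proved, stated in full; the proofs are below) =====
def Claim_equal_create_hamming_code_py : Prop := ∀ (data : List Int) (parity_bits : Int), Dom_create_hamming_code_py data parity_bits → Pre_create_hamming_code_py data parity_bits → Spec_create_hamming_code_py data parity_bits (create_hamming_code_py data parity_bits)

-- ===== LEMMAS AND PROOFS =====

-- proof-only abbreviations
def pvXF (c : List Int) (L : List Nat) : Int := L.foldl (fun par q => PySem.Int.bxor par (c.getD q 0)) 0

def pvM (i nn : Nat) : List Nat := (List.range nn).filter (fun q => Nat.testBit (q + 1) i)

def pvPred (i q : Nat) : Bool := !pvPow2Pos q && Nat.testBit (q + 1) i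

def pvP (c0 : List Int) (nn i : Nat) : Int := pvXF c0 ((List.range nn).filter (pvPred i))

-- A's parity expression for bit i, read from code list c (the port's nested fold, let-expanded)
def pvParA (c : List Int) (nn i : Nat) : Int :=
  (pvStride (2 ^ i - 1) nn (2 * ((2 ^ i - 1) + 1))).foldl (fun par j =>
    (List.range (min ((2 ^ i - 1) + 1) (nn - j))).foldl (fun par k =>
      if j + k ≠ 2 ^ i - 1 then PySem.Int.bxor par (c.getD (j + k) 0) else par) par) 0

-- the enumeration of A's strided double loop for parity bit i
def pvLA (i nn : Nat) : List Nat :=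
  (pvStride (2 ^ i - 1) nn (2 * ((2 ^ i - 1) + 1))).flatMap (fun j =>
    (List.range (min ((2 ^ i - 1) + 1) (nn - j))).map (fun k => j + k))

-- "c agrees with c0 on all non-power-of-two positions"
def pvNP (c c0 : List Int) : Prop := ∀ q, pvPow2Pos q = false → c.getD q 0 = c0.getD q 0

theorem pvStride_mem (a b s q : Nat) (hs : 0 < s) :
    q ∈ pvStride a b s ↔ ∃ t, q = a + t * s ∧ q < b := by
  have key : ∀ t : Nat, t < (b - a + s - 1) / s ↔ a + t * s < b := by
    intro t
    rw [Nat.lt_iff_add_one_le, Nat.le_div_iff_mul_le hs]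
    have h1 : (t + 1) * s = t * s + s := by ring
    omega
  simp only [pvStride, List.mem_map, List.mem_range]
  constructor
  · rintro ⟨t, ht, rfl⟩; exact ⟨t, rfl, (key t).1 ht⟩
  · rintro ⟨t, rfl, hb⟩; exact ⟨t, (key t).2 hb, rfl⟩

theorem pvTestBit_mod (x i : Nat) :
    Nat.testBit x i = true ↔ 2 ^ i ≤ x % 2 ^ (i + 1) := by
  have hp : 0 < 2 ^ i := Nat.two_pow_pos _
  have hd : x % 2 ^ (i + 1) / 2 ^ i = x / 2 ^ i % 2 := by
    rw [pow_succ]; exact Nat.mod_mul_right_div_self x (2 ^ i) 2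
  have hr : x % 2 ^ (i + 1) < 2 ^ (i + 1) := Nat.mod_lt _ (Nat.two_pow_pos _)
  have h2 : 1 ≤ x % 2 ^ (i + 1) / 2 ^ i ↔ 2 ^ i ≤ x % 2 ^ (i + 1) := by
    rw [Nat.le_div_iff_mul_le hp, one_mul]
  have h3 : x % 2 ^ (i + 1) / 2 ^ i < 2 := by
    rw [Nat.div_lt_iff_lt_mul hp]; rw [pow_succ] at hr; omega
  rw [Nat.testBit_eq_decide_div_mod_eq, decide_eq_true_iff]
  omega

theorem pvLA_mem (i nn q : Nat) :
    q ∈ pvLA i nn ↔ q < nn ∧ Nat.testBit (q + 1) i = true := by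
  have hH : 0 < 2 ^ i := Nat.two_pow_pos _
  have hpp1 : (2 ^ i - 1) + 1 = 2 ^ i := by omega
  have hS : 2 * ((2 ^ i - 1) + 1) = 2 ^ (i + 1) := by rw [hpp1, pow_succ]; ring
  have hSpos : 0 < 2 ^ (i + 1) := Nat.two_pow_pos _
  rw [pvTestBit_mod]
  unfold pvLA
  rw [List.mem_flatMap]
  constructor
  · rintro ⟨j, hj, hx⟩
    rw [hS] at hj
    rw [pvStride_mem _ _ _ _ hSpos] at hj
    obtain ⟨t, rfl, hjnn⟩ := hj
    simp only [List.mem_map, List.mem_range] at hx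
    obtain ⟨k, hk, rfl⟩ := hx
    rw [hpp1] at hk
    have hq1 : (2 ^ i - 1) + t * 2 ^ (i + 1) + k + 1 = (2 ^ i + k) + t * 2 ^ (i + 1) := by omega
    have hmod : ((2 ^ i - 1) + t * 2 ^ (i + 1) + k + 1) % 2 ^ (i + 1)
        = 2 ^ i + k := by
      rw [hq1, Nat.add_mul_mod_self_right, Nat.mod_eq_of_lt (by rw [pow_succ]; omega)]
    constructor
    · omega
    · omega
  · rintro ⟨hq, hmod⟩
    have hdm := Nat.div_add_mod (q + 1) (2 ^ (i + 1))
    rw [Nat.mul_comm] at hdm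
    have hrlt : (q + 1) % 2 ^ (i + 1) < 2 ^ (i + 1) := Nat.mod_lt _ hSpos
    have hps : 2 ^ (i + 1) = 2 * 2 ^ i := by rw [pow_succ]; ring
    refine ⟨(2 ^ i - 1) + ((q + 1) / 2 ^ (i + 1)) * (2 ^ (i + 1)), ?_, ?_⟩
    · rw [hS, pvStride_mem _ _ _ _ hSpos]
      exact ⟨(q + 1) / 2 ^ (i + 1), rfl, by omega⟩
    · simp only [List.mem_map, List.mem_range]
      refine ⟨(q + 1) % 2 ^ (i + 1) - 2 ^ i, ?_, by omega⟩
      rw [hpp1]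
      omega

theorem pvLA_pairwise (i nn : Nat) : List.Pairwise (· < ·) (pvLA i nn) := by
  have hH : 0 < 2 ^ i := Nat.two_pow_pos _
  unfold pvLA
  rw [List.pairwise_flatMap]
  constructor
  · intro j hj
    rw [List.pairwise_map]
    exact List.pairwise_lt_range.imp (by omega)
  · unfold pvStride
    rw [List.pairwise_map]
    refine List.pairwise_lt_range.imp ?_
    intro t₁ t₂ hlt x hx y hy
    simp only [List.mem_map, List.mem_range] at hx hy
    obtain ⟨k₁, hk₁, rfl⟩ := hx
    obtain ⟨k₂, hk₂, rfl⟩ := hy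
    have hmul : (t₁ + 1) * (2 * ((2 ^ i - 1) + 1)) ≤ t₂ * (2 * ((2 ^ i - 1) + 1)) :=
      Nat.mul_le_mul_right _ (by omega)
    have hexp : (t₁ + 1) * (2 * ((2 ^ i - 1) + 1)) = t₁ * (2 * ((2 ^ i - 1) + 1)) + 2 * ((2 ^ i - 1) + 1) := by ring
    omega

theorem pvLA_eq_M (i nn : Nat) : pvLA i nn = pvM i nn := by
  have h1 := pvLA_pairwise i nn
  have h2 : List.Pairwise (· < ·) (pvM i nn) :=
    List.pairwise_lt_range.filter _
  have hmem : ∀ q, q ∈ pvLA i nn ↔ q ∈ pvM i nn := by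
    intro q
    rw [pvLA_mem]
    unfold pvM
    simp [List.mem_filter, List.mem_range]
  have hperm : (pvLA i nn).Perm (pvM i nn) :=
    (List.perm_ext_iff_of_nodup (h1.imp Nat.ne_of_lt) (h2.imp Nat.ne_of_lt)).mpr hmem
  exact hperm.eq_of_pairwise (le := (· < ·)) (fun a b _ _ hab hba => by omega) h1 h2

theorem pvPow2Pos_pow (k : Nat) : pvPow2Pos (2 ^ k - 1) = true := by
  have hH : 0 < 2 ^ k := Nat.two_pow_pos _
  have h1 : (2 ^ k - 1) + 1 = 2 ^ k := by omega
  unfold pvPow2Pos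
  rw [h1, beq_iff_eq]
  apply Nat.eq_of_testBit_eq
  intro m
  rw [Nat.testBit_and, Nat.testBit_two_pow, Nat.testBit_two_pow_sub_one, Nat.zero_testBit]
  by_cases h : k = m <;> simp [h]

theorem pvPow2Pos_exists (q : Nat) (h : pvPow2Pos q = true) : ∃ k, q = 2 ^ k - 1 := by
  induction q using Nat.strong_induction_on with
  | _ q ih =>
    unfold pvPow2Pos at h
    rw [beq_iff_eq] at h
    have hbits : ∀ m, ¬(Nat.testBit (q + 1) m = true ∧ Nat.testBit q m = true) := by
      intro m ⟨h1, h2⟩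
      have := congrArg (fun x => Nat.testBit x m) h
      simp [Nat.testBit_and, Nat.zero_testBit, h1, h2] at this
    rcases Nat.eq_zero_or_pos q with hq0 | hqpos
    · exact ⟨0, by omega⟩
    rcases Nat.even_or_odd q with he | ho
    · -- q even and positive: some bit m ≥ 1 of q is set, and it is set in q+1 too
      exfalso
      have hb0 : Nat.testBit q 0 = false := by
        rw [Nat.testBit_zero]
        rcases he with ⟨r, hr⟩
        simp [hr]; omega
      have hex : ∃ m, Nat.testBit q m = true := by
        by_contra hall
        push Not at hall
        have : q = 0 := Nat.eq_of_testBit_eq (fun m => by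
          rw [Nat.zero_testBit]; exact Bool.eq_false_iff.mpr (fun hc => (hall m) hc))
        omega
      obtain ⟨m, hm⟩ := hex
      have hm1 : m ≠ 0 := fun hc => by rw [hc, hb0] at hm; exact Bool.false_ne_true hm
      obtain ⟨m', rfl⟩ := Nat.exists_eq_succ_of_ne_zero hm1
      have hdiv : (q + 1) / 2 = q / 2 := by
        obtain ⟨r, hr⟩ := he; omega
      have : Nat.testBit (q + 1) (m' + 1) = true := by
        rw [Nat.testBit_add_one, hdiv, ← Nat.testBit_add_one]; exact hm
      exact hbits (m' + 1) ⟨this, hm⟩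
    · -- q odd: recurse on q / 2
      have hd2 : pvPow2Pos (q / 2) = true := by
        unfold pvPow2Pos
        rw [beq_iff_eq]
        apply Nat.eq_of_testBit_eq
        intro m
        rw [Nat.testBit_and, Nat.zero_testBit]
        have hdiv : q / 2 + 1 = (q + 1) / 2 := by
          rcases ho with ⟨r, hr⟩; omega
        have e1 : Nat.testBit (q / 2 + 1) m = Nat.testBit (q + 1) (m + 1) := by
          rw [hdiv, Nat.testBit_add_one]
        have e2 : Nat.testBit (q / 2) m = Nat.testBit q (m + 1) := by
          rw [Nat.testBit_add_one]
        rw [e1, e2]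
        have := hbits (m + 1)
        cases h1 : Nat.testBit (q + 1) (m + 1) <;> cases h2 : Nat.testBit q (m + 1) <;> simp_all
      obtain ⟨k, hk⟩ := ih (q / 2) (by omega) hd2
      refine ⟨k + 1, ?_⟩
      have : 2 ^ (k + 1) = 2 * 2 ^ k := by rw [pow_succ]; ring
      have hkpos : 0 < 2 ^ k := Nat.two_pow_pos _
      rcases ho with ⟨r, hr⟩
      omega

theorem pvPred_eq (i q : Nat) :
    ((q != 2 ^ i - 1) && Nat.testBit (q + 1) i) = pvPred i q := by
  unfold pvPred
  cases hb : Nat.testBit (q + 1) i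
  · simp
  · simp only [Bool.and_true]
    cases hp : pvPow2Pos q
    · have hne : q ≠ 2 ^ i - 1 := fun hc => by
        rw [hc, pvPow2Pos_pow] at hp; simp at hp
      simp [hne]
    · obtain ⟨k, rfl⟩ := pvPow2Pos_exists q hp
      have hH : 0 < 2 ^ k := Nat.two_pow_pos _
      have h1 : (2 ^ k - 1) + 1 = 2 ^ k := by omega
      rw [h1, Nat.testBit_two_pow] at hb
      have : k = i := by simpa using hb
      subst this
      simp

theorem pvParA_eq_XF (c : List Int) (nn i : Nat) :
    pvParA c nn i = pvXF c ((List.range nn).filter (pvPred i)) := by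
  have h1 : pvParA c nn i = (pvLA i nn).foldl
      (fun par q => if q ≠ 2 ^ i - 1 then PySem.Int.bxor par (c.getD q 0) else par) 0 := by
    unfold pvParA pvLA
    rw [List.foldl_flatMap]
    congr 1
    funext par j
    rw [List.foldl_map]
  rw [h1, pvLA_eq_M]
  have h2 : (fun (par : Int) (q : Nat) => if q ≠ 2 ^ i - 1 then PySem.Int.bxor par (c.getD q 0) else par)
      = fun par q => if (q != 2 ^ i - 1) = true then PySem.Int.bxor par (c.getD q 0) else par := by
    funext par q
    by_cases h : q = 2 ^ i - 1 <;> simp [h]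
  rw [h2, ← List.foldl_filter]
  unfold pvM pvXF
  rw [List.filter_filter]
  congr 1
  exact List.filter_congr (fun x _ => pvPred_eq i x)

theorem pvScatter_length (v : Nat) : ∀ (i : Nat) (pb x : Int) (par : List Int),
    (pvScatter v i pb x par).length = par.length := by
  induction v using Nat.strong_induction_on with
  | _ v ih =>
    intro i pb x par
    rw [pvScatter]
    split
    · rfl
    · rename_i hv
      rw [ih (v / 2) (Nat.div_lt_self (Nat.pos_of_ne_zero hv) one_lt_two)]
      split <;> simp

theorem pvScatter_getD (v : Nat) : ∀ (i : Nat) (pb x : Int) (par : List Int) (m : Nat),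
    (pvScatter v i pb x par).getD m 0 =
      if i ≤ m ∧ Nat.testBit v (m - i) = true ∧ (m : Int) < pb ∧ m < par.length
      then PySem.Int.bxor (par.getD m 0) x else par.getD m 0 := by
  induction v using Nat.strong_induction_on with
  | _ v ih =>
    intro i pb x par m
    rw [pvScatter]
    split
    · rename_i hv
      subst hv
      simp [Nat.zero_testBit]
    · rename_i hv
      rw [ih (v / 2) (Nat.div_lt_self (Nat.pos_of_ne_zero hv) one_lt_two)]
      set par' := if v % 2 = 1 ∧ (i : Int) < pb then par.set i (PySem.Int.bxor (par.getD i 0) x) else par with hpar'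
      have hlen : par'.length = par.length := by
        rw [hpar']; split <;> simp [List.length_set]
      rcases Nat.lt_trichotomy m i with hmi | hmi | hmi
      · -- m < i : untouched everywhere
        have hne : i ≠ m := by omega
        have hgd : par'.getD m 0 = par.getD m 0 := by
          rw [hpar']; split
          · simp [List.getD_eq_getElem?_getD, List.getElem?_set_ne hne]
          · rfl
        rw [hgd, hlen]
        have h1 : ¬ (i + 1 ≤ m) := by omega
        have h2 : ¬ (i ≤ m) := by omega
        simp [h1, h2]
      · -- m = i : decided by this step
        subst hmi
        have h1 : ¬ (m + 1 ≤ m) := by omega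
        simp only [h1, false_and, if_false]
        have hb0 : Nat.testBit v (m - m) = decide (v % 2 = 1) := by
          simp [Nat.testBit_zero]
        rw [hpar']
        split
        · rename_i hcond
          by_cases hlt : m < par.length
          · have : (par.set m (PySem.Int.bxor (par.getD m 0) x)).getD m 0 = PySem.Int.bxor (par.getD m 0) x := by
              simp [List.getD_eq_getElem?_getD, List.getElem?_set_self hlt]
            rw [this]
            simp [hcond.1, hcond.2, hlt]
          · have hset : par.set m (PySem.Int.bxor (par.getD m 0) x) = par :=
              List.set_eq_of_length_le (by omega)
            rw [hset]
            simp [hlt]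
        · rename_i hcond
          have : ¬ (m ≤ m ∧ Nat.testBit v (m - m) = true ∧ (m : Int) < pb ∧ m < par.length) := by
            rw [hb0]
            simp only [decide_eq_true_iff]
            tauto
          rw [if_neg this]
      · -- m > i
        have hne : i ≠ m := by omega
        have hgd : par'.getD m 0 = par.getD m 0 := by
          rw [hpar']; split
          · simp [List.getD_eq_getElem?_getD, List.getElem?_set_ne hne]
          · rfl
        have hbit : Nat.testBit (v / 2) (m - (i + 1)) = Nat.testBit v (m - i) := by
          have : m - i = (m - (i + 1)) + 1 := by omega
          rw [this, Nat.testBit_add_one]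
        rw [hgd, hlen, hbit]
        have h1 : (i + 1 ≤ m) ↔ (i ≤ m) := by omega
        simp [h1]

theorem pvBFold_getD (pb : Int) (g : Nat → Int) (m : Nat) :
    ∀ (L : List Nat) (par : List Int), (m : Int) < pb → m < par.length →
    ((L.foldl (fun par p => if pvPow2Pos p then par
        else pvScatter (p + 1) 0 pb (g p) par) par).getD m 0)
      = (L.filter (fun p => pvPred m p)).foldl (fun acc p => PySem.Int.bxor acc (g p)) (par.getD m 0) := by
  intro L
  induction L with
  | nil => intro par _ _; rfl
  | cons p L ih =>
    intro par hm hlen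
    simp only [List.foldl_cons, List.filter_cons]
    cases hp : pvPow2Pos p
    · -- data position: scatter step
      have hlen' : m < (pvScatter (p + 1) 0 pb (g p) par).length := by
        rw [pvScatter_length]; exact hlen
      rw [if_neg (by simp), ih _ hm hlen']
      have hgd : (pvScatter (p + 1) 0 pb (g p) par).getD m 0 =
          if Nat.testBit (p + 1) m = true then PySem.Int.bxor (par.getD m 0) (g p) else par.getD m 0 := by
        rw [pvScatter_getD]
        have h0 : 0 ≤ m := Nat.zero_le m
        by_cases hb : Nat.testBit (p + 1) m = true
        · rw [if_pos ⟨h0, by simpa using hb, hm, hlen⟩, if_pos hb]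
        · rw [if_neg (fun hc => absurd hc.2.1 (by simp [hb])), if_neg hb]
      cases hb : Nat.testBit (p + 1) m
      · rw [hgd]
        simp [pvPred, hb]
      · rw [hgd]
        simp [pvPred, hp, hb]
    · -- parity slot: skipped
      rw [if_pos rfl]
      have : pvPred m p = false := by simp [pvPred, hp]
      rw [this]
      simp only [Bool.false_eq_true, if_false]
      exact ih _ hm hlen

theorem pvXF_congr (c c0 : List Int) : ∀ (L : List Nat) (b : Int),
    (∀ q ∈ L, c.getD q 0 = c0.getD q 0) →
    L.foldl (fun par q => PySem.Int.bxor par (c.getD q 0)) b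
      = L.foldl (fun par q => PySem.Int.bxor par (c0.getD q 0)) b := by
  intro L
  induction L with
  | nil => intro b _; rfl
  | cons p L ih =>
    intro b h
    simp only [List.foldl_cons]
    rw [h p (by simp)]
    exact ih _ (fun q hq => h q (by simp [hq]))

theorem pvParA_stable (c c0 : List Int) (nn i : Nat) (h : pvNP c c0) :
    pvParA c nn i = pvP c0 nn i := by
  rw [pvParA_eq_XF]
  unfold pvP pvXF
  apply pvXF_congr
  intro q hq
  rw [List.mem_filter] at hq
  have hp : pvPow2Pos q = false := by
    have := hq.2
    unfold pvPred at this
    simp only [Bool.and_eq_true, Bool.not_eq_true'] at this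
    exact this.1
  exact h q hp

theorem pvSetsFold (c0 : List Int) (nn : Nat) : ∀ (L : List Nat) (c : List Int), pvNP c c0 →
    L.foldl (fun c i => c.set (2 ^ i - 1) (pvParA c nn i)) c
      = L.foldl (fun c i => c.set (2 ^ i - 1) (pvP c0 nn i)) c := by
  intro L
  induction L with
  | nil => intro c _; rfl
  | cons i L ih =>
    intro c h
    simp only [List.foldl_cons]
    rw [pvParA_stable c c0 nn i h]
    apply ih
    intro q hq
    have hne : 2 ^ i - 1 ≠ q := fun hc => by rw [← hc, pvPow2Pos_pow] at hq; simp at hq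
    simp only [List.getD_eq_getElem?_getD, List.getElem?_set_ne hne]
    exact h q hq

theorem pvSetsFold_congr (f f' : Nat → Int) : ∀ (L : List Nat) (c : List Int),
    (∀ i ∈ L, f i = f' i) →
    L.foldl (fun c i => c.set (2 ^ i - 1) (f i)) c
      = L.foldl (fun c i => c.set (2 ^ i - 1) (f' i)) c := by
  intro L
  induction L with
  | nil => intro c _; rfl
  | cons i L ih =>
    intro c h
    simp only [List.foldl_cons]
    rw [h i (by simp)]
    exact ih _ (fun j hj => h j (by simp [hj]))

theorem pvMain (data : List Int) (parity_bits : Int) :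
    create_hamming_code_py data parity_bits = create_hamming_code_py_alt data parity_bits := by
  set nn := (data.length + parity_bits).toNat with hnn
  set code0 := pvPlace data nn with hc0
  set parB := (List.range nn).foldl (fun par p =>
      if pvPow2Pos p then par
      else pvScatter (p + 1) 0 parity_bits (code0.getD p 0) par)
      (List.replicate parity_bits.toNat 0) with hparB
  have hA : create_hamming_code_py data parity_bits
      = (List.range parity_bits.toNat).foldl
          (fun c i => c.set (2 ^ i - 1) (pvParA c nn i)) code0 := rfl
  have hB : create_hamming_code_py_alt data parity_bits
      = (List.range parity_bits.toNat).foldl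
          (fun c i => c.set (2 ^ i - 1) (parB.getD i 0)) code0 := rfl
  rw [hA, hB]
  rw [pvSetsFold code0 nn _ code0 (fun q _ => rfl)]
  apply (pvSetsFold_congr (fun i => parB.getD i 0) (fun i => pvP code0 nn i) _ code0 ?_).symm
  intro i hi
  rw [List.mem_range] at hi
  have hipb : (i : Int) < parity_bits := by omega
  have h := pvBFold_getD parity_bits (fun p => code0.getD p 0) i (List.range nn)
      (List.replicate parity_bits.toNat 0) hipb (by simp [hi])
  show parB.getD i 0 = pvP code0 nn i
  exact h.trans (by rw [List.getD_replicate _ hi]; rfl)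

-- ===== VERDICT (by name: the statement is the Claim_ definition above) =====
theorem create_hamming_code_py_spec : Claim_equal_create_hamming_code_py := by
  intro data parity_bits _ _
  exact pvMain data parity_bits
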